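-- pv_equiv track=rewrite | github.com/pypi-data/pypi-mirror-374 | packages/lackey-mcp/lackey_mcp-5.0.0.tar.gz/lackey_mcp-5.0.0/src/lackey/mcp/intent_classifier.py | _flexible_word_boundary_match
-- ===== SOURCE A (Python) =====
-- def _flexible_word_boundary_match(query_text: str, pattern: str) -> bool:
--     """Check if pattern words appear in query with flexible word boundaries."""
--     pattern_words = pattern.split()
--
--     # Check if all pattern words appear in order (allowing insertions)
--     query_words = query_text.split()
--     pattern_idx = 0
--
--     for query_word in query_words:
--         if (
--             pattern_idx < len(pattern_words)
--             and query_word == pattern_words[pattern_idx]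
--         ):
--             pattern_idx += 1
--
--     # Return True if all pattern words were found in order
--     return pattern_idx == len(pattern_words)
-- ===== SOURCE B (Python) =====
-- def _flexible_word_boundary_match(query_text: str, pattern: str) -> bool:
--     """Check if pattern words appear in query with flexible word boundaries."""
--     # Index pass: map each query word to the ordered list of positions where it occurs.
--     positions = {}
--     for i, w in enumerate(query_text.split()):
--         positions.setdefault(w, []).append(i)
--     # Greedy pass over the pattern: jump to the first occurrence after the last match.
--     last = -1
--     for w in pattern.split():
--         last = next((p for p in positions.get(w, []) if p > last), None)
--         if last is None:
--             return False
--     return True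
-- ===== Notes on version B (the rewrite author's own statement) =====
-- stated objective: alternative
-- what changed: Instead of A's single scan of the query words with an integer pattern index, B first builds a hash index from each query word to its sorted occurrence positions, then loops over the pattern words jumping greedily to the first indexed occurrence after the previous match.
import Mathlib
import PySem

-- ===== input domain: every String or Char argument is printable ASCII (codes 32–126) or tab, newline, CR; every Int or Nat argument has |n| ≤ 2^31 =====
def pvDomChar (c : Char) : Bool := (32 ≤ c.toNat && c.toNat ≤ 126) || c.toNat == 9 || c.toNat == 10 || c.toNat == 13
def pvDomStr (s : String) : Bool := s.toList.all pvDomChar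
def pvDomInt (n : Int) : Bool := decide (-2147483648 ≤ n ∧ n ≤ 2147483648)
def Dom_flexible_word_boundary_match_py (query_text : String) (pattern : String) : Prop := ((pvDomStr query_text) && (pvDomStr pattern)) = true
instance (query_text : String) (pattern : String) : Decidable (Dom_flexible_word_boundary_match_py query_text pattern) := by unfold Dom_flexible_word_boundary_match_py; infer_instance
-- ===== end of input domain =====

-- B replaces A's single scan of the query words (with an integer pattern index) by a
-- two-stage algorithm: build an index word → occurrence positions, then greedily jump
-- through the pattern words; an alternative of the same exact behaviour.

-- ===== PORT A =====
def flexible_word_boundary_match_py (query_text : String) (pattern : String) : Bool :=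
  let pattern_words := PySem.Str.split₀ pattern
  let query_words := PySem.Str.split₀ query_text
  let pattern_idx := query_words.foldl
    (fun pattern_idx query_word =>
      if pattern_idx < pattern_words.length && query_word == pattern_words.getD pattern_idx "" then
        pattern_idx + 1
      else
        pattern_idx) 0
  pattern_idx == pattern_words.length

-- ===== PORT B =====
-- positions = {}; for i, w in enumerate(query_text.split()): positions.setdefault(w, []).append(i)
def pvBuildPositions (query_words : List String) : PySem.Dict String (List Int) :=
  (PySem.List.enumerate query_words 0).foldl
    (fun d iw => d.insert iw.2 (d.getD iw.2 [] ++ [iw.1])) PySem.Dict.empty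

-- next((p for p in ps if p > last), None)
def pvNextGt (last : Int) : List Int → Option Int
  | [] => none
  | p :: ps => if last < p then some p else pvNextGt last ps

-- the greedy pattern loop carrying `last`
def pvGreedyLoop (positions : PySem.Dict String (List Int)) : List String → Int → Bool
  | [], _ => true
  | w :: ws, last =>
    match pvNextGt last (positions.getD w []) with
    | none => false
    | some p => pvGreedyLoop positions ws p

def flexible_word_boundary_match_py_alt (query_text : String) (pattern : String) : Bool :=
  pvGreedyLoop (pvBuildPositions (PySem.Str.split₀ query_text)) (PySem.Str.split₀ pattern) (-1)

-- ===== PRECONDITION & SPEC =====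
def Spec_flexible_word_boundary_match_py (query_text : String) (pattern : String) (out : Bool) : Prop := out = flexible_word_boundary_match_py_alt query_text pattern
instance (query_text : String) (pattern : String) (out : Bool) : Decidable (Spec_flexible_word_boundary_match_py query_text pattern out) := by unfold Spec_flexible_word_boundary_match_py; infer_instance

-- ===== CLAIM (what is proved, stated in full; the proofs are below) =====
def Claim_equal_flexible_word_boundary_match_py : Prop := ∀ (query_text : String) (pattern : String), Dom_flexible_word_boundary_match_py query_text pattern → Spec_flexible_word_boundary_match_py query_text pattern (flexible_word_boundary_match_py query_text pattern)

-- ===== LEMMAS AND PROOFS =====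

-- reference semantics: greedy consumption of the query-word list (proof-side only)
def pvConsumeUntil (w : String) : List String → Option (List String)
  | [] => none
  | q :: qs => if q == w then some qs else pvConsumeUntil w qs

def pvAllInIter : List String → List String → Bool
  | [], _ => true
  | w :: ws, qs =>
    match pvConsumeUntil w qs with
    | none => false
    | some qs' => pvAllInIter ws qs'

-- A's fold equals the greedy consumption semantics
theorem pv_fold_eq_allIn (pw : List String) (qs : List String) (pi : Nat) (hpi : pi ≤ pw.length) :
    (qs.foldl
      (fun pattern_idx query_word =>
        if pattern_idx < pw.length && query_word == pw.getD pattern_idx "" then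
          pattern_idx + 1
        else
          pattern_idx) pi == pw.length) = pvAllInIter (pw.drop pi) qs := by
  induction qs generalizing pi with
  | nil =>
    simp only [List.foldl_nil]
    rcases Nat.lt_or_ge pi pw.length with h | h
    · rw [List.drop_eq_getElem_cons h]
      simp [pvAllInIter, pvConsumeUntil, Nat.ne_of_lt h]
    · have : pi = pw.length := Nat.le_antisymm hpi h
      subst this
      simp [pvAllInIter]
  | cons q qs ih =>
    simp only [List.foldl_cons]
    rcases Nat.lt_or_ge pi pw.length with h | h
    · rw [List.drop_eq_getElem_cons h]
      by_cases hq : q = pw[pi]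
      · have hcond : (pi < pw.length && (q == pw.getD pi "")) = true := by
          simp [h, hq]
        rw [if_pos hcond, ih (pi + 1) h]
        simp [pvAllInIter, pvConsumeUntil, hq]
      · have hgd : pw.getD pi "" = pw[pi] := List.getD_eq_getElem _ _ h
        rw [hgd, if_neg (by simp [hq]), ih pi hpi]
        rw [List.drop_eq_getElem_cons h]
        simp [pvAllInIter, pvConsumeUntil, hq]
    · have heq : pi = pw.length := Nat.le_antisymm hpi h
      subst heq
      rw [if_neg (by simp), ih _ hpi]
      simp [List.drop_length, pvAllInIter]

-- positions of w in qs when the first element carries label i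
def pvPosFrom (w : String) : List String → Int → List Int
  | [], _ => []
  | q :: qs, i => (if q == w then [i] else []) ++ pvPosFrom w qs (i + 1)

-- first index ≥ n of w in qs when the first element carries label n
def pvFirstFrom (w : String) : List String → Nat → Option Nat
  | [], _ => none
  | q :: qs, n => if q == w then some n else pvFirstFrom w qs (n + 1)

-- the dict fold builds exactly the position lists
theorem pv_build_getD (qs : List String) (s : Int) (d : PySem.Dict String (List Int)) (w : String) :
    ((PySem.List.enumerate qs s).foldl
      (fun d iw => d.insert iw.2 (d.getD iw.2 [] ++ [iw.1])) d).getD w []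
      = d.getD w [] ++ pvPosFrom w qs s := by
  induction qs generalizing s d with
  | nil => simp [PySem.List.enumerate_nil, pvPosFrom]
  | cons q qs ih =>
    rw [PySem.List.enumerate_cons, List.foldl_cons, ih]
    by_cases hq : q = w
    · simp [pvPosFrom, hq]
    · simp [pvPosFrom, hq, PySem.Dict.getD_insert, Ne.symm hq]

-- threshold below every label: pvNextGt finds the first occurrence
theorem pv_nextGt_low (w : String) (qs : List String) (i : Nat) (t : Int) (ht : t < (i : Int)) :
    pvNextGt t (pvPosFrom w qs (i : Int)) = (pvFirstFrom w qs i).map (fun k => (k : Int)) := by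
  induction qs generalizing i with
  | nil => simp [pvPosFrom, pvFirstFrom, pvNextGt]
  | cons q qs ih =>
    by_cases hq : q = w
    · simp [pvPosFrom, pvFirstFrom, hq, pvNextGt, ht]
    · have : pvPosFrom w (q :: qs) (i : Int) = pvPosFrom w qs ((i : Int) + 1) := by
        simp [pvPosFrom, hq]
      rw [this]
      have h1 : ((i : Int) + 1) = ((i + 1 : Nat) : Int) := by push_cast; ring
      rw [h1, ih (i + 1) (by omega)]
      simp [pvFirstFrom, hq]

-- labels below the threshold n are skipped: restrict to the suffix
theorem pv_nextGt_drop (w : String) (qs : List String) (n i : Nat) (hin : i ≤ n) :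
    pvNextGt ((n : Int) - 1) (pvPosFrom w qs (i : Int))
      = pvNextGt ((n : Int) - 1) (pvPosFrom w (qs.drop (n - i)) (n : Int)) := by
  induction qs generalizing i with
  | nil => simp [pvPosFrom]
  | cons q qs ih =>
    rcases Nat.lt_or_ge i n with h | h
    · have hd : (q :: qs).drop (n - i) = qs.drop (n - (i + 1)) := by
        have : n - i = (n - (i + 1)) + 1 := by omega
        rw [this]; rfl
      have hskip : ∀ l, pvNextGt ((n : Int) - 1) ((if q == w then [(i : Int)] else []) ++ l)
          = pvNextGt ((n : Int) - 1) l := by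
        intro l
        by_cases hq : q = w
        · simp only [hq, beq_self_eq_true, if_true, List.singleton_append]
          have : ¬ ((n : Int) - 1 < (i : Int)) := by omega
          simp [pvNextGt, this]
        · simp [hq]
      rw [hd]
      calc pvNextGt ((n : Int) - 1) (pvPosFrom w (q :: qs) (i : Int))
          = pvNextGt ((n : Int) - 1) (pvPosFrom w qs ((i : Int) + 1)) := by
            rw [show pvPosFrom w (q :: qs) (i : Int)
                = (if q == w then [(i : Int)] else []) ++ pvPosFrom w qs ((i : Int) + 1) from rfl]
            exact hskip _
        _ = pvNextGt ((n : Int) - 1) (pvPosFrom w (qs.drop (n - (i + 1))) (n : Int)) := by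
            rw [show ((i : Int) + 1) = ((i + 1 : Nat) : Int) by push_cast; ring]
            exact ih (i + 1) h
    · have : i = n := Nat.le_antisymm hin h
      subst this
      simp

-- consuming the iterator equals jumping to the first occurrence index
theorem pv_consume_firstFrom (w : String) (qs : List String) (l : List String) (n : Nat)
    (hl : qs.drop n = l) :
    pvConsumeUntil w l = (pvFirstFrom w l n).map (fun k => qs.drop (k + 1)) := by
  induction l generalizing n with
  | nil => simp [pvConsumeUntil, pvFirstFrom]
  | cons q t ih =>
    have ht : qs.drop (n + 1) = t := by
      rw [← List.tail_drop, hl]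
      rfl
    by_cases hq : q = w
    · simp [pvConsumeUntil, pvFirstFrom, hq, ht]
    · simp only [pvConsumeUntil, pvFirstFrom]
      rw [if_neg (by simp [hq]), if_neg (by simp [hq])]
      exact ih (n + 1) ht

-- the greedy index loop equals the greedy consumption semantics
theorem pv_greedy_eq_allIn (qs : List String) (ws : List String) (n : Nat) :
    pvGreedyLoop (pvBuildPositions qs) ws ((n : Int) - 1) = pvAllInIter ws (qs.drop n) := by
  induction ws generalizing n with
  | nil => simp [pvGreedyLoop, pvAllInIter]
  | cons w ws ih =>
    have hpos : (pvBuildPositions qs).getD w [] = pvPosFrom w qs 0 := by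
      rw [pvBuildPositions, pv_build_getD]
      rfl
    have h0 : pvPosFrom w qs 0 = pvPosFrom w qs ((0 : Nat) : Int) := by norm_num
    have hchain : pvNextGt ((n : Int) - 1) ((pvBuildPositions qs).getD w [])
        = (pvFirstFrom w (qs.drop n) n).map (fun k => (k : Int)) := by
      rw [hpos, h0, pv_nextGt_drop w qs n 0 (Nat.zero_le n)]
      simp only [Nat.sub_zero]
      exact pv_nextGt_low w (qs.drop n) n ((n : Int) - 1) (by omega)
    cases hf : pvFirstFrom w (qs.drop n) n with
    | none =>
      have h1 : pvNextGt ((n : Int) - 1) ((pvBuildPositions qs).getD w []) = none := by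
        rw [hchain, hf]; rfl
      have h2 : pvConsumeUntil w (qs.drop n) = none := by
        rw [pv_consume_firstFrom w qs (qs.drop n) n rfl, hf]; rfl
      simp [pvGreedyLoop, pvAllInIter, h1, h2]
    | some k =>
      have h1 : pvNextGt ((n : Int) - 1) ((pvBuildPositions qs).getD w []) = some (k : Int) := by
        rw [hchain, hf]; rfl
      have h2 : pvConsumeUntil w (qs.drop n) = some (qs.drop (k + 1)) := by
        rw [pv_consume_firstFrom w qs (qs.drop n) n rfl, hf]; rfl
      simp only [pvGreedyLoop, pvAllInIter, h1, h2]
      rw [show (k : Int) = ((k + 1 : Nat) : Int) - 1 by push_cast; ring]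
      exact ih (k + 1)

-- ===== VERDICT (by name: the statement is the Claim_ definition above) =====
theorem flexible_word_boundary_match_py_spec : Claim_equal_flexible_word_boundary_match_py := by
  intro query_text pattern _
  unfold Spec_flexible_word_boundary_match_py flexible_word_boundary_match_py flexible_word_boundary_match_py_alt
  have hA := pv_fold_eq_allIn (PySem.Str.split₀ pattern) (PySem.Str.split₀ query_text) 0 (Nat.zero_le _)
  have hB := pv_greedy_eq_allIn (PySem.Str.split₀ query_text) (PySem.Str.split₀ pattern) 0
  simp only [List.drop_zero] at hA hB
  rw [hA]
  rw [show ((0 : Nat) : Int) - 1 = (-1 : Int) by norm_num] at hB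
  rw [hB]
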